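-- pv_equiv track=rewrite | github.com/Taesun0727/Algorithm-Repo | 2024-03/[BOJ] G4_11037_중복 없는 수/11037.py | check
-- ===== SOURCE A (Python) =====
-- def check(num):
--     check_num = set()
--     len_num = str(num)
--     for n in str(num):
--         if n == '0':
--             return False
--         check_num.add(n)
--     if len(check_num) == len(len_num):
--         return True
--     return False
-- ===== SOURCE B (Python) =====
-- def check(num):
--     s = str(num)
--     if '0' in s:
--         return False
--     t = sorted(s)
--     for a, b in zip(t, t[1:]):
--         if a == b:
--             return False
--     return True
-- ===== Notes on version B (the rewrite author's own statement) =====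
-- stated objective: alternative
-- what changed: Replaces the incremental hash-set build with an early '0' membership test followed by sort-then-adjacent-scan duplicate detection over the characters of str(num).
import Mathlib
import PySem

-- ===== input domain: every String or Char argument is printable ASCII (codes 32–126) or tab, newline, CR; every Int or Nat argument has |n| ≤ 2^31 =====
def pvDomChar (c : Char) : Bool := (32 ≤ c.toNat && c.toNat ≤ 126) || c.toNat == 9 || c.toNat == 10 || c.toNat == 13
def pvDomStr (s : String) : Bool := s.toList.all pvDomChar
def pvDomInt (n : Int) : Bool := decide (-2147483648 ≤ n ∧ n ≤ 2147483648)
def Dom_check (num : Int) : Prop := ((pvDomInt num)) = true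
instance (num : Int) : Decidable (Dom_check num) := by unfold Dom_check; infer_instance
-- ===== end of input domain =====

-- B changes the algorithm: instead of building a set while scanning, it rejects on a '0'
-- membership test and then detects duplicates by sorting the characters and scanning adjacent pairs.

-- ===== PORT A =====
-- for n in str(num): early return on '0', else add to the set; finally compare sizes
def checkGo (lenNum : Nat) : List Char → PySem.Set Char → Bool
  | [], s => decide (PySem.Set.len s = lenNum)
  | c :: rest, s => if c = '0' then false else checkGo lenNum rest (PySem.Set.add s c)

def check (num : Int) : Bool :=
  let len_num := PySem.Int.toChars num
  checkGo len_num.length (PySem.Int.toChars num) PySem.Set.empty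

-- ===== PORT B =====
-- scan of adjacent pairs of the sorted character list (the zip loop in Source B)
def noAdjDup : List Char → Bool
  | a :: b :: rest => if a = b then false else noAdjDup (b :: rest)
  | _ => true

def check_alt (num : Int) : Bool :=
  let s := PySem.Int.toChars num
  if s.contains '0' then false
  else noAdjDup (PySem.List.sorted s (fun c => c) false)

-- ===== PRECONDITION & SPEC =====
def Spec_check (num : Int) (out : Bool) : Prop := out = check_alt num
instance (num : Int) (out : Bool) : Decidable (Spec_check num out) := by unfold Spec_check; infer_instance

-- ===== CLAIM (what is proved, stated in full; the proofs are below) =====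
def Claim_equal_check : Prop := ∀ (num : Int), Dom_check num → Spec_check num (check num)

-- ===== LEMMAS AND PROOFS =====

-- A's loop returns False as soon as '0' is seen
lemma checkGo_of_mem_zero (len : Nat) (l : List Char) (s : PySem.Set Char)
    (h : '0' ∈ l) : checkGo len l s = false := by
  induction l generalizing s with
  | nil => cases h
  | cons c rest ih =>
    simp only [checkGo]
    rcases List.mem_cons.mp h with h | h
    · simp [h.symm]
    · split_ifs with hc
      · rfl
      · exact ih (PySem.Set.add s c) h

-- without a '0', A's loop is the set update followed by the size comparison
lemma checkGo_of_not_mem_zero (len : Nat) (l : List Char) (s : PySem.Set Char)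
    (h : '0' ∉ l) : checkGo len l s = decide ((PySem.Set.update s l).length = len) := by
  induction l generalizing s with
  | nil => simp [checkGo, PySem.Set.len, PySem.Set.update]
  | cons c rest ih =>
    have hc : c ≠ '0' := fun he => h (he ▸ List.mem_cons_self)
    simp only [checkGo, if_neg hc]
    rw [ih _ (fun hm => h (List.mem_cons_of_mem _ hm))]
    rfl

-- the adjacent-pair scan on a (≤)-sorted list decides Nodup
lemma noAdjDup_iff (t : List Char) (h : t.Pairwise (· ≤ ·)) :
    noAdjDup t = true ↔ t.Nodup := by
  induction t with
  | nil => simp [noAdjDup]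
  | cons a t ih =>
    cases t with
    | nil => simp [noAdjDup]
    | cons b rest =>
      have h' := List.pairwise_cons.mp h
      by_cases hab : a = b
      · subst hab
        simp [noAdjDup]
      · have ihb := ih h'.2
        simp only [noAdjDup, if_neg hab, ihb]
        constructor
        · intro hb
          refine List.nodup_cons.mpr ⟨?_, hb⟩
          intro hmem
          rcases List.mem_cons.mp hmem with he | hmem
          · exact hab he
          · -- a ≤ b and b ≤ x for x ∈ rest, with a ≠ b, forces a ∉ rest
            have hab' : a < b := lt_of_le_of_ne (h'.1 b List.mem_cons_self) hab
            have hbx : b ≤ a := (List.pairwise_cons.mp h'.2).1 a hmem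
            exact absurd hbx (not_le_of_gt hab')
        · exact fun hb => (List.nodup_cons.mp hb).2

-- a Python set of the chars has the list's length iff the list has no duplicates
lemma ofList_length_iff (l : List Char) :
    (PySem.Set.ofList l).length = l.length ↔ l.Nodup := by
  constructor
  · intro hlen
    have hnd := PySem.Set.nodup_ofList l
    have hsub : PySem.Set.ofList l ⊆ l := fun x hx => (PySem.Set.mem_ofList l x).mp hx
    have hsp : List.Subperm (PySem.Set.ofList l) l := hnd.subperm hsub
    have hperm : (PySem.Set.ofList l).Perm l := by
      rcases hsp with ⟨u, hu, hsl⟩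
      have hlu : u.length = l.length := le_antisymm hsl.length_le (by rw [hu.length_eq, hlen])
      exact hu.symm.trans (hsl.eq_of_length hlu ▸ List.Perm.refl u)
    exact hperm.nodup_iff.mp hnd
  · intro hnd
    rw [PySem.Set.ofList_eq_self_of_nodup l hnd]

-- ===== VERDICT (by name: the statement is the Claim_ definition above) =====
theorem check_spec : Claim_equal_check := by
  intro num _
  unfold Spec_check check check_alt
  set l := PySem.Int.toChars num with hl
  by_cases hz : '0' ∈ l
  · simp only [checkGo_of_mem_zero _ _ _ hz, List.contains_eq_mem, hz, decide_true, if_true]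
  · have hc : l.contains '0' = false := by
      simp [List.contains_eq_mem, hz]
    simp only [hc, if_false, Bool.false_eq_true]
    rw [checkGo_of_not_mem_zero _ _ _ hz]
    have hup : PySem.Set.update PySem.Set.empty l = PySem.Set.ofList l := by
      exact PySem.Set.update_empty l
    rw [hup]
    have hperm := PySem.List.sorted_perm l (fun c => c) false
    have hpw := PySem.List.sorted_pairwise (xs := l) (key := fun c => c)
    by_cases hn : l.Nodup
    · rw [(noAdjDup_iff _ hpw).mpr (hperm.nodup_iff.mpr hn),
        decide_eq_true ((ofList_length_iff l).mpr hn)]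
    · have h1 : noAdjDup (PySem.List.sorted l (fun c => c) false) = false := by
        cases hh : noAdjDup (PySem.List.sorted l (fun c => c) false) with
        | false => rfl
        | true => exact absurd (hperm.nodup_iff.mp ((noAdjDup_iff _ hpw).mp hh)) hn
      rw [h1, decide_eq_false (fun he => hn ((ofList_length_iff l).mp he))]
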